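-- pv_equiv track=rewrite | github.com/Diya-Sajan/100-days-of-code | Basic/Segregate Even and Odd numbers/segregate-even-and-odd-numbers.py | segregateEvenOdd
-- ===== SOURCE A (Python) =====
-- def segregateEvenOdd(arr, n):
-- 	ar2 = sorted(arr)
-- 	arr.clear()
-- 	for i in ar2:
-- 	    if i%2 == 0:
-- 	        arr.append(i)
-- 	for i in ar2:
-- 	    if i%2!=0:
-- 	        arr.append(i)
--
-- 	return arr
-- ===== SOURCE B (Python) =====
-- def segregateEvenOdd(arr, n):
--     arr[:] = sorted(arr, key=lambda x: (x % 2, x))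
--     return arr
-- ===== Notes on version B (the rewrite author's own statement) =====
-- stated objective: idiomatic
-- what changed: Replaced sort-then-two-filtering-append-passes with a single composite-key sort (key (x % 2, x)) assigned back in place, so no explicit loops or filtering passes remain.
import Mathlib
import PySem

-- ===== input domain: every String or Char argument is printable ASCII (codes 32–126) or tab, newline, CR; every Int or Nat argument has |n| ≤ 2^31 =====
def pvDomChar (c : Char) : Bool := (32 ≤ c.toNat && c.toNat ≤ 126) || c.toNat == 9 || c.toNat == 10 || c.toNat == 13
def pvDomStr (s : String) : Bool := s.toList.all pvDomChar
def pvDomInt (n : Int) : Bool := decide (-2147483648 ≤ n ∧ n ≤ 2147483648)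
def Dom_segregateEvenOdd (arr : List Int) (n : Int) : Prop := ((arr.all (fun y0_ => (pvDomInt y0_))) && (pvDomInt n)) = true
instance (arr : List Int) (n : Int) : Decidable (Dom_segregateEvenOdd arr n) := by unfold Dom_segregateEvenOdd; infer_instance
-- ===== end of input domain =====

-- B replaces A's sort-then-two-filtering-append-passes by a single composite-key sort
-- (key (x % 2, x)) — more idiomatic, same O(n log n) cost. Both A and B mutate the list
-- argument in place in Python; the equivalence proved here is about the return value.

-- ===== PORT A =====
-- ar2 = sorted(arr); arr.clear(); two append loops (evens then odds); return arr
def segregateEvenOdd (arr : List Int) (n : Int) : List Int :=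
  let ar2 := PySem.List.sorted arr (fun x => x) false
  let out1 := ar2.foldl (fun acc i => if PySem.Int.mod i 2 = 0 then acc ++ [i] else acc) []
  let out2 := ar2.foldl (fun acc i => if PySem.Int.mod i 2 ≠ 0 then acc ++ [i] else acc) out1
  out2

-- ===== PORT B =====
-- arr[:] = sorted(arr, key=lambda x: (x % 2, x)); return arr
def segregateEvenOdd_alt (arr : List Int) (n : Int) : List Int :=
  PySem.List.sorted2 arr (fun x => PySem.Int.mod x 2) (fun x => x) false

-- ===== PRECONDITION & SPEC =====
def Spec_segregateEvenOdd (arr : List Int) (n : Int) (out : List Int) : Prop := out = segregateEvenOdd_alt arr n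
instance (arr : List Int) (n : Int) (out : List Int) : Decidable (Spec_segregateEvenOdd arr n out) := by unfold Spec_segregateEvenOdd; infer_instance

-- ===== CLAIM (what is proved, stated in full; the proofs are below) =====
def Claim_equal_segregateEvenOdd : Prop := ∀ (arr : List Int) (n : Int), Dom_segregateEvenOdd arr n → Spec_segregateEvenOdd arr n (segregateEvenOdd arr n)

-- ===== LEMMAS AND PROOFS =====

-- Python's tuple comparison in sorted2 is exactly the lexicographic order on Int ×ₗ Int.
theorem sorted2_eq_sorted_toLex {α : Type} (xs : List α) (k1 k2 : α → Int) :
    PySem.List.sorted2 xs k1 k2 false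
      = PySem.List.sorted xs (fun x => toLex (k1 x, k2 x)) false := by
  rw [PySem.List.sorted_eq_foldl_insertBy]
  show List.foldl (fun acc x => PySem.List.insertBy (fun a b => decide (k1 a < k1 b) || (!decide (k1 b < k1 a) && decide (k2 a < k2 b))) x acc) [] xs = _
  have hbef : (fun a b : α => decide (k1 a < k1 b) || (!decide (k1 b < k1 a) && decide (k2 a < k2 b)))
      = fun a b : α => decide (toLex (k1 a, k2 a) < toLex (k1 b, k2 b)) := by
    funext a b
    by_cases h1 : k1 a < k1 b
    · simp [h1, Prod.Lex.lt_iff]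
    · by_cases h2 : k1 b < k1 a
      · simp [Prod.Lex.lt_iff, h1, h2]
        omega
      · have he : k1 a = k1 b := le_antisymm (not_lt.mp h2) (not_lt.mp h1)
        simp [Prod.Lex.lt_iff, he]
  rw [hbef]

-- helper: the composite key of B, and facts about parity under Python's mod
def pvKey (x : Int) : Lex (Int × Int) := toLex (PySem.Int.mod x 2, x)

theorem pvKey_injective : Function.Injective pvKey := by
  intro x y h
  have := congrArg (fun p => (ofLex p).2) h
  simpa [pvKey] using this

theorem mod_two_eq_one_of_ne_zero (b : Int) (h : ¬ PySem.Int.mod b 2 = 0) :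
    PySem.Int.mod b 2 = 1 := by
  have h1 := PySem.Int.mod_nonneg b (by norm_num : (0:Int) < 2)
  have h2 := PySem.Int.mod_lt b (by norm_num : (0:Int) < 2)
  omega

theorem segregateEvenOdd_spec : Claim_equal_segregateEvenOdd := by
  intro arr n _
  unfold Spec_segregateEvenOdd
  show segregateEvenOdd arr n = _
  simp only [segregateEvenOdd, segregateEvenOdd_alt]
  rw [sorted2_eq_sorted_toLex]
  rw [PySem.List.foldl_append_ite_eq_filter, PySem.List.foldl_append_ite_eq_filter]
  simp only [List.nil_append]
  set ar2 := PySem.List.sorted arr (fun x => x) false with har2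
  set pe : Int → Bool := fun x => decide (PySem.Int.mod x 2 = 0) with hpe
  have hpo : (fun x => decide (¬ PySem.Int.mod x 2 = 0)) = fun x => !pe x := by
    funext x; simp only [hpe, decide_not]
  rw [hpo]
  -- both sides are key-nondecreasing rearrangements of arr under the injective key pvKey
  apply PySem.List.eq_of_perm_of_pairwise_le_of_injective pvKey pvKey_injective
  · exact ((List.filter_append_perm pe ar2).trans
      (PySem.List.sorted_perm arr (fun x => x) false)).trans
      (PySem.List.sorted_perm arr (fun x => toLex (PySem.Int.mod x 2, x)) false).symm
  · -- evens (key fst 0) come first, each block nondecreasing in the second component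
    have hsorted : ar2.Pairwise (fun a b : Int => a ≤ b) := by
      simpa using PySem.List.sorted_pairwise arr (fun x => x)
    rw [List.pairwise_append]
    refine ⟨?_, ?_, ?_⟩
    · refine List.Pairwise.imp_of_mem ?_ (List.Pairwise.sublist List.filter_sublist hsorted)
      intro a b ha hb hab
      have ha0 : PySem.Int.mod a 2 = 0 := by
        have := (List.mem_filter.mp ha).2; simpa [hpe] using this
      have hb0 : PySem.Int.mod b 2 = 0 := by
        have := (List.mem_filter.mp hb).2; simpa [hpe] using this
      exact Prod.Lex.le_iff.mpr (Or.inr ⟨by simp only [pvKey, ofLex_toLex]; rw [ha0, hb0], by simpa only [pvKey, ofLex_toLex] using hab⟩)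
    · refine List.Pairwise.imp_of_mem ?_ (List.Pairwise.sublist List.filter_sublist hsorted)
      intro a b ha hb hab
      have ha1 : PySem.Int.mod a 2 = 1 := by
        have := (List.mem_filter.mp ha).2
        exact mod_two_eq_one_of_ne_zero a (by simpa [hpe] using this)
      have hb1 : PySem.Int.mod b 2 = 1 := by
        have := (List.mem_filter.mp hb).2
        exact mod_two_eq_one_of_ne_zero b (by simpa [hpe] using this)
      exact Prod.Lex.le_iff.mpr (Or.inr ⟨by simp only [pvKey, ofLex_toLex]; rw [ha1, hb1], by simpa only [pvKey, ofLex_toLex] using hab⟩)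
    · intro a ha b hb
      have ha0 : PySem.Int.mod a 2 = 0 := by
        have := (List.mem_filter.mp ha).2; simpa [hpe] using this
      have hb1 : PySem.Int.mod b 2 = 1 :=
        mod_two_eq_one_of_ne_zero b (by simpa [hpe] using (List.mem_filter.mp hb).2)
      exact Prod.Lex.le_iff.mpr (Or.inl (by simp only [pvKey, ofLex_toLex]; rw [ha0, hb1]; norm_num))
  · simpa [pvKey] using
      PySem.List.sorted_pairwise arr (fun x => toLex (PySem.Int.mod x 2, x))
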